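-- pv_equiv track=rewrite | github.com/ko509/Weekly-AlgoStudy | 최고의 집합.py | solution
-- ===== SOURCE A (Python) =====
-- def solution(n, s):
--     answer = []
--
--     if n > s:
--         return [-1]
--     else:
--         i = s//n
--         answer = [i for _ in range(n)]
--         total = sum(answer)
--         index = 0
--         while total < s:
--             answer[index] += 1
--             total+=1
--             index+=1
--             if index == n:
--                 index = 0
--     answer.sort()
--     return answer
-- ===== SOURCE B (Python) =====
-- def solution(n, s):
--     if n > s:
--         return [-1]
--     q, r = divmod(s, n)
--     return [q] * (n - r) + [q + 1] * r
-- ===== Notes on version B (the rewrite author's own statement) =====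
-- stated objective: faster
-- what changed: Replaces the [s//n]*n list, the O(s%n) increment while-loop and the final sort by a closed-form construction [q]*(n-r)+[q+1]*r from divmod(s,n).
import Mathlib
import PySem

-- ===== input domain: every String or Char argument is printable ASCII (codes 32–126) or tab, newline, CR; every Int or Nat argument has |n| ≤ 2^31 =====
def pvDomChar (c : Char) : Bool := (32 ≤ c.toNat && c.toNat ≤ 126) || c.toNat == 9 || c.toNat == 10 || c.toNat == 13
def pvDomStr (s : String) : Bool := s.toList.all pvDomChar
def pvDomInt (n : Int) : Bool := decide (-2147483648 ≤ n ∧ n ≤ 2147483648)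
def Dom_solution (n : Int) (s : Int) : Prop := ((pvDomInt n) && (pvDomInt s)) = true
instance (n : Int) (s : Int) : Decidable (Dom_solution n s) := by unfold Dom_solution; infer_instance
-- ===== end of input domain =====

-- B replaces A's [s//n]*n list, the increment while-loop and the final sort by the closed form [q]*(n-r)+[q+1]*r.

-- ===== PORT A =====
-- termination measure for A's while-loop (cited by name in decreasing_by)
lemma solutionLoop_dec {total s : Int} (h : total < s) : (s - (total+1)).toNat < (s - total).toNat := by omega
-- A's 'while total < s' loop: answer[index] += 1; total += 1; index wraps at n
def solutionLoop (answer : List Int) (total : Int) (index : Int) (n : Int) (s : Int) : List Int :=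
  if _h : total < s then
    let answer' := answer.set index.toNat (answer.getD index.toNat 0 + 1)
    let index' := if index + 1 = n then 0 else index + 1
    solutionLoop answer' (total + 1) index' n s
  else answer
termination_by (s - total).toNat
decreasing_by exact solutionLoop_dec _h

def solution (n : Int) (s : Int) : List Int :=
  if n > s then [-1]
  else
    let i := PySem.Int.floordiv s n
    let answer := (PySem.List.pyRange 0 n 1).map (fun _ => i)
    let total := answer.sum
    PySem.List.sorted (solutionLoop answer total 0 n s) (fun x => x) false

-- ===== PORT B =====
def solution_alt (n : Int) (s : Int) : List Int :=
  if n > s then [-1]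
  else
    match PySem.Int.divmod? s n with
    | none => []   -- ZeroDivisionError in Python (n = 0); outside Pre_
    | some (q, r) => List.replicate (n - r).toNat q ++ List.replicate r.toNat (q + 1)

-- ===== PRECONDITION & SPEC =====
-- Pre_ excludes exactly the inputs where A raises: n = 0 with 0 ≤ s (ZeroDivisionError)
-- and n < 0 with 0 < s (IndexError); A returns a value on every other input.
def Pre_solution (n : Int) (s : Int) : Prop := ¬ ((n = 0 ∧ 0 ≤ s) ∨ (n < 0 ∧ 0 < s))
instance (n : Int) (s : Int) : Decidable (Pre_solution n s) := by unfold Pre_solution; infer_instance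
def pvWitness_solution : Int × Int := (3, 10)
def Spec_solution (n : Int) (s : Int) (out : List Int) : Prop := out = solution_alt n s
instance (n : Int) (s : Int) (out : List Int) : Decidable (Spec_solution n s out) := by unfold Spec_solution; infer_instance

-- ===== CLAIM (what is proved, stated in full; the proofs are below) =====
def Claim_equal_solution : Prop := ∀ (n : Int) (s : Int), Dom_solution n s → Pre_solution n s → Spec_solution n s (solution n s)

-- ===== LEMMAS AND PROOFS =====

-- set/getD at the seam of "bumped prefix ++ rest"
lemma repl_set_getD (a c : Int) : ∀ (t : Nat) (b : Int) (rest : List Int),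
    (List.replicate t a ++ b :: rest).set t c = List.replicate t a ++ c :: rest ∧
    (List.replicate t a ++ b :: rest).getD t 0 = b := by
  intro t
  induction t with
  | zero => simp
  | succ k ih => intro b rest; simp [List.replicate_succ, ih b rest]

-- Running A's loop m more steps from the state "first t slots already bumped, total = s - m, index = t".
lemma solutionLoop_run (i n s : Int) :
    ∀ (m t u : Nat), m ≤ u → (t : Int) + u = n →
      solutionLoop (List.replicate t (i+1) ++ List.replicate u i) (s - m) (t : Int) n s
        = List.replicate (t + m) (i+1) ++ List.replicate (u - m) i := by
  intro m
  induction m with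
  | zero =>
    intro t u _ _
    rw [solutionLoop]
    simp
  | succ m ih =>
    intro t u hmu htu
    rw [solutionLoop]
    have hlt : s - (↑(m+1) : Int) < s := by push_cast; omega
    simp only [hlt, dif_pos]
    obtain ⟨u', rfl⟩ : ∃ u', u = u' + 1 := ⟨u - 1, by omega⟩
    have hset :
        (List.replicate t (i+1) ++ List.replicate (u'+1) i).set ((t : Int)).toNat
          ((List.replicate t (i+1) ++ List.replicate (u'+1) i).getD ((t : Int)).toNat 0 + 1)
        = List.replicate (t+1) (i+1) ++ List.replicate u' i := by
      rw [Int.toNat_natCast, List.replicate_succ,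
        (repl_set_getD (i+1) (i+1) t i (List.replicate u' i)).2,
        (repl_set_getD (i+1) (i+1) t i (List.replicate u' i)).1,
        List.replicate_succ']
      simp [List.append_assoc]
    rw [hset]
    have hstep : s - (↑(m+1) : Int) + 1 = s - (m : Int) := by push_cast; ring
    rw [hstep]
    by_cases hm : m = 0
    · subst hm
      -- loop exits on the next test (total = s)
      rw [solutionLoop]
      simp
    · -- m ≥ 1, hence t + 1 < n and the index does not wrap
      have hne : (t : Int) + 1 ≠ n := by omega
      rw [if_neg hne]
      have hrec := ih (t+1) u' (by omega) (by push_cast; omega)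
      push_cast at hrec
      rw [show u' + 1 - (m+1) = u' - m from by omega,
        show t + (m+1) = (t+1) + m from by omega]
      exact hrec

lemma sorted_two_blocks (a b : Nat) (i : Int) :
    PySem.List.sorted (List.replicate a (i+1) ++ List.replicate b i) (fun x => x) false
      = List.replicate b i ++ List.replicate a (i+1) := by
  apply PySem.List.sorted_id_eq_of_perm_of_pairwise
  · exact List.perm_append_comm
  · rw [List.pairwise_append]
    refine ⟨List.pairwise_replicate.mpr (Or.inr le_rfl),
            List.pairwise_replicate.mpr (Or.inr le_rfl), ?_⟩
    intro x hx y hy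
    rw [List.eq_of_mem_replicate hx, List.eq_of_mem_replicate hy]
    omega

-- ===== VERDICT (by name: the statement is the Claim_ definition above) =====
theorem solution_spec : Claim_equal_solution := by
  intro n s _hdom hpre
  unfold Pre_solution at hpre
  unfold Spec_solution solution solution_alt
  by_cases hns : n > s
  · simp [hns]
  · simp only [hns, if_false]
    by_cases hn : 0 < n
    case neg =>
      -- n < 0 and s ≤ 0 (the n = 0 cases are outside Pre_): both sides return []
      have hnneg : n < 0 := by omega
      have hs0 : s ≤ 0 := by omega
      have hn0 : n ≠ 0 := by omega
      have hinit : (PySem.List.pyRange 0 n 1).map (fun _ => PySem.Int.floordiv s n)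
          = List.replicate n.toNat (PySem.Int.floordiv s n) := by
        rw [List.map_const', PySem.List.length_pyRange_one]; congr 1; omega
      have hnt : n.toNat = 0 := by omega
      rw [hinit, hnt]
      simp only [List.replicate_zero, List.sum_nil]
      rw [solutionLoop]
      simp only [show ¬ ((0:Int) < s) from by omega, dite_false]
      have hdm : PySem.Int.divmod? s n
          = some (PySem.Int.floordiv s n, PySem.Int.mod s n) := by
        simp [PySem.Int.divmod?, PySem.Int.floordiv, PySem.Int.mod, hn0]
      have hb := PySem.Int.mod_neg_bounds s hnneg
      have h1 : (n - PySem.Int.mod s n).toNat = 0 := by omega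
      have h2 : (PySem.Int.mod s n).toNat = 0 := by omega
      rw [hdm]
      simp [PySem.List.sorted, h1, h2]
    case pos =>
      have hn0 : n ≠ 0 := by omega
      set i := PySem.Int.floordiv s n with hi
      set r := PySem.Int.mod s n with hr
      have hdm : PySem.Int.divmod? s n = some (i, r) := by
        simp [PySem.Int.divmod?, PySem.Int.floordiv, PySem.Int.mod, hn0, hi, hr]
      rw [hdm]
      have hr0 : 0 ≤ r := PySem.Int.mod_nonneg s hn
      have hrn : r < n := PySem.Int.mod_lt s hn
      have hins : i * n + r = s := PySem.Int.floordiv_mul_add_mod s n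
      have hinit : (PySem.List.pyRange 0 n 1).map (fun _ => i) = List.replicate n.toNat i := by
        rw [List.map_const', PySem.List.length_pyRange_one]
        congr 1; omega
      rw [hinit]
      have hsum : (List.replicate n.toNat i).sum = s - r := by
        rw [List.sum_replicate, nsmul_eq_mul,
          show ((n.toNat : Int)) = n from by omega, mul_comm]
        omega
      rw [hsum, show s - r = s - ((r.toNat : Int)) from by omega]
      have hloop := solutionLoop_run i n s r.toNat 0 n.toNat (by omega) (by omega)
      simp only [Nat.cast_zero, List.replicate_zero, List.nil_append, Nat.zero_add] at hloop
      rw [hloop]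
      show _ = List.replicate (n - r).toNat i ++ List.replicate r.toNat (i + 1)
      rw [sorted_two_blocks]
      congr 2
      omega
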